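-- pv_equiv track=rewrite | github.com/jdrae/algorithm | by_sites/samsung/이차원배열과연산.py | func
-- ===== SOURCE A (Python) =====
-- from collections import Counter
--
-- def func(arr):
--     tmp = []
--     mx = 0
--     for i in range(len(arr)):
--         cnt = [(k,v) for k, v in Counter(arr[i]).items() if k != 0]
--         cnt.sort(key=lambda x: (x[1],x[0]))
--         lst = []
--         for a in cnt:
--             lst.extend([*a])
--         mx = max(mx, len(lst))
--         tmp.append(lst)
--
--     for i in range(len(tmp)):
--         lst = tmp[i] + [0]*(mx - len(tmp[i]))
--         tmp[i] = lst
--     return tmp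
-- ===== SOURCE B (Python) =====
-- def func(arr):
--     def row_flat(row):
--         pending = [(v, row.count(v)) for v in dict.fromkeys(row) if v != 0]
--         out = []
--         while pending:
--             p = min(pending, key=lambda q: (q[1], q[0]))
--             pending.remove(p)
--             out += [p[0], p[1]]
--         return out
--
--     def build(rows):
--         if not rows:
--             return [], 0
--         head = row_flat(rows[0])
--         rest, mx = build(rows[1:])
--         return [head] + rest, max(len(head), mx)
--
--     rows, mx = build(arr)
--     return [r + [0] * (mx - len(r)) for r in rows]
-- ===== Notes on version B (the rewrite author's own statement) =====
-- stated objective: alternative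
-- what changed: B never sorts and never builds a counter: per row it counts each first-occurrence distinct value with row.count, orders the pairs by repeated min-extraction (selection) instead of a sort call, builds the rows by recursion on the list computing the global max on the way back, and pads with one comprehension instead of a second in-place loop.
import Mathlib
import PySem

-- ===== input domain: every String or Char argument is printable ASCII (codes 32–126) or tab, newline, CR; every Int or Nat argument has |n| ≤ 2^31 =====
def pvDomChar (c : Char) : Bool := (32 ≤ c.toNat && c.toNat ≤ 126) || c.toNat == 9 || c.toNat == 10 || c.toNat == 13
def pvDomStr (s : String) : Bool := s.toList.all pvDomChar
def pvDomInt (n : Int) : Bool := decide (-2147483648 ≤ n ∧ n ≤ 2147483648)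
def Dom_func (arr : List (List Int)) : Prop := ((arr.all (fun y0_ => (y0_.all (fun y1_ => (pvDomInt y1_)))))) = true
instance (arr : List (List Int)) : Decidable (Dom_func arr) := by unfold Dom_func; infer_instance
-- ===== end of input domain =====

-- B orders each row's (value,count) pairs by repeated min-extraction instead of a sort call, counts by
-- row.count over first-occurrence distinct values instead of Counter, and builds/pads rows by recursion
-- with one comprehension (objective: alternative, same observable result).

-- ===== PORT A =====
def func (arr : List (List Int)) : List (List Int) :=
  -- tmp = []; mx = 0; for i in range(len(arr)): …
  let st := arr.foldl (fun (st : List (List Int) × Int) row =>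
    -- cnt = [(k,v) for k, v in Counter(arr[i]).items() if k != 0]
    let cnt := ((PySem.Dict.counter row).items).filter (fun p => decide (p.1 ≠ 0))
    -- cnt.sort(key=lambda x: (x[1],x[0]))
    let cnt := PySem.List.sorted2 cnt (fun x => x.2) (fun x => x.1) false
    -- lst = []; for a in cnt: lst.extend([*a])
    let lst := cnt.foldl (fun l a => l ++ [a.1, a.2]) []
    -- mx = max(mx, len(lst)); tmp.append(lst)
    (st.1 ++ [lst], max st.2 (lst.length : Int))) ([], 0)
  -- for i in range(len(tmp)): tmp[i] = tmp[i] + [0]*(mx - len(tmp[i]))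
  st.1.map (fun l => l ++ PySem.List.pyRepeat [(0 : Int)] (st.2 - (l.length : Int)))

-- ===== PORT B =====
-- (termination fact for the while loop's port: pending.remove(p) shortens pending)
theorem pvRemoveLen {xs rest : List (Int × Int)} {v : Int × Int}
    (h : PySem.List.remove? xs v = some rest) : rest.length < xs.length := by
  have hv : v ∈ xs := by
    by_contra hv
    rw [(PySem.List.remove?_eq_none_iff xs v).mpr hv] at h
    simp at h
  rw [PySem.List.remove?_eq_some_erase xs v hv] at h
  cases h
  have h1 := List.length_erase_of_mem hv
  have h2 : xs.length ≠ 0 := by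
    intro h0
    rw [List.length_eq_zero_iff.mp h0] at hv
    exact absurd hv (List.not_mem_nil)
  omega

-- while pending: p = min(pending, key=lambda q: (q[1], q[0])); pending.remove(p); out += [p[0], p[1]]
def pvSel (pending : List (Int × Int)) : List Int :=
  match hm : PySem.List.min2? pending (fun q => q.2) (fun q => q.1) with
  | none => []          -- pending is empty: the while loop ends
  | some p =>
    match hr : PySem.List.remove? pending p with
    | none => []        -- unreachable: p ∈ pending
    | some rest => p.1 :: p.2 :: pvSel rest
termination_by pending.length
decreasing_by exact pvRemoveLen hr

def pvRowFlat (row : List Int) : List Int :=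
  -- pending = [(v, row.count(v)) for v in dict.fromkeys(row) if v != 0]
  pvSel (((PySem.List.dedup row).filter (fun v => decide (v ≠ 0))).map
    (fun v => (v, (PySem.List.count row v : Int))))

def pvBuild (rows : List (List Int)) : List (List Int) × Int :=
  -- def build(rows): if not rows: return [], 0; head…; rest, mx = build(rows[1:]); …
  match rows with
  | [] => ([], 0)
  | r :: t =>
    let head := pvRowFlat r
    let p := pvBuild t
    (head :: p.1, max (head.length : Int) p.2)

def func_alt (arr : List (List Int)) : List (List Int) :=
  let p := pvBuild arr
  -- [r + [0] * (mx - len(r)) for r in rows]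
  p.1.map (fun r => r ++ PySem.List.pyRepeat [(0 : Int)] (p.2 - (r.length : Int)))

-- ===== PRECONDITION & SPEC =====
def Spec_func (arr : List (List Int)) (out : List (List Int)) : Prop := out = func_alt arr
instance (arr : List (List Int)) (out : List (List Int)) : Decidable (Spec_func arr out) := by unfold Spec_func; infer_instance

-- ===== CLAIM (what is proved, stated in full; the proofs are below) =====
def Claim_equal_func : Prop := ∀ (arr : List (List Int)), Dom_func arr → Spec_func arr (func arr)

-- ===== LEMMAS AND PROOFS =====

-- Python's tuple key (q[1], q[0]) as a lexicographic key
def pvKey (p : Int × Int) : Int ×ₗ Int := toLex (p.2, p.1)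

theorem pvKeyInj : Function.Injective pvKey := by
  intro a b h
  have h' : (a.2, a.1) = (b.2, b.1) := congrArg ofLex h
  obtain ⟨x1, x2⟩ := a
  obtain ⟨y1, y2⟩ := b
  simp only [Prod.mk.injEq] at h' ⊢
  exact ⟨h'.2, h'.1⟩

theorem pvMin2Eq (xs : List (Int × Int)) :
    PySem.List.min2? xs (fun q => q.2) (fun q => q.1) = PySem.List.min? xs pvKey := by
  unfold PySem.List.min2? PySem.List.min?
  congr 1
  funext acc x
  cases acc with
  | none => rfl
  | some m =>
    simp only []
    have hiff : (decide (x.2 < m.2) || (!decide (m.2 < x.2) && decide (x.1 < m.1))) = true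
        ↔ pvKey x < pvKey m := by
      simp only [Bool.or_eq_true, Bool.and_eq_true, Bool.not_eq_true', decide_eq_true_eq,
        decide_eq_false_iff_not, pvKey, Prod.Lex.toLex_lt_toLex]
      omega
    by_cases h : pvKey x < pvKey m
    · rw [if_pos (hiff.mpr h), if_pos h]
    · rw [if_neg (fun hb => h (hiff.mp hb)), if_neg h]

theorem pvBefore_eq :
    (fun (a b : Int × Int) => decide (a.2 < b.2) || (!decide (b.2 < a.2) && decide (a.1 < b.1)))
      = (fun (a b : Int × Int) => decide (pvKey a < pvKey b)) := by
  funext a b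
  rw [Bool.eq_iff_iff]
  simp only [Bool.or_eq_true, Bool.and_eq_true, Bool.not_eq_true', decide_eq_true_eq,
    decide_eq_false_iff_not, pvKey, Prod.Lex.toLex_lt_toLex]
  omega

theorem pvSorted2_eq_sorted_lex (xs : List (Int × Int)) :
    PySem.List.sorted2 xs (fun x => x.2) (fun x => x.1) false
      = PySem.List.sorted xs pvKey false := by
  unfold PySem.List.sorted2 PySem.List.sorted
  simp only [Bool.false_eq_true, if_false]
  rw [pvBefore_eq]

-- selection = the sorted order, on pairwise-distinct pairs
theorem pvSelSorted (pending : List (Int × Int)) (hnd : pending.Nodup) :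
    pvSel pending = (PySem.List.sorted pending pvKey false).flatMap (fun p => [p.1, p.2]) := by
  induction pending using pvSel.induct with
  | case1 pending hm =>
    rw [pvMin2Eq] at hm
    have hnil := (PySem.List.min?_eq_none_iff pending pvKey).mp hm
    subst hnil
    rw [pvSel]
    simp [PySem.List.min2?, PySem.List.sorted]
  | case2 pending p hm hr =>
    rw [pvMin2Eq] at hm
    exact absurd (PySem.List.min?_mem hm) ((PySem.List.remove?_eq_none_iff pending p).mp hr)
  | case3 pending p hm rest hr ih =>
    rw [pvMin2Eq] at hm
    have hp : p ∈ pending := PySem.List.min?_mem hm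
    have hrest : rest = pending.erase p := by
      have := PySem.List.remove?_eq_some_erase pending p hp
      rw [hr] at this
      exact Option.some.inj this
    subst hrest
    have hndr : (pending.erase p).Nodup := hnd.erase p
    have hsorted : PySem.List.sorted pending pvKey false
        = p :: PySem.List.sorted (pending.erase p) pvKey false := by
      apply PySem.List.sorted_eq_of_perm_of_pairwise_lt
      · exact ((PySem.List.sorted_perm (pending.erase p) pvKey false).cons p).trans
          (List.perm_cons_erase hp).symm
      · refine List.pairwise_cons.mpr ⟨?_, ?_⟩
        · intro y hy
          have hyer : y ∈ pending.erase p := (PySem.List.mem_sorted _ _ _ _).mp hy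
          have hymem : y ∈ pending := List.mem_of_mem_erase hyer
          have hle := PySem.List.min?_isMin hm y hymem
          have hne : y ≠ p := by
            intro he
            subst he
            exact (hnd.not_mem_erase) hyer
          exact lt_of_le_of_ne hle (fun he => hne (pvKeyInj he.symm))
        · have hpw := PySem.List.sorted_pairwise (pending.erase p) pvKey
          have hndsorted : (PySem.List.sorted (pending.erase p) pvKey false).Nodup :=
            (PySem.List.sorted_perm (pending.erase p) pvKey false).nodup_iff.mpr hndr
          exact (hpw.and hndsorted).imp (fun ⟨hle, hne⟩ =>
            lt_of_le_of_ne hle (fun he => hne (pvKeyInj he)))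
    rw [pvSel]
    split
    · rename_i heq
      rw [pvMin2Eq, hm] at heq
      simp at heq
    · rename_i q heq
      rw [pvMin2Eq, hm] at heq
      have hq : p = q := Option.some.inj heq
      subst hq
      split
      · rename_i heq2
        rw [hr] at heq2
        simp at heq2
      · rename_i rest2 heq2
        rw [hr] at heq2
        have he : pending.erase p = rest2 := Option.some.inj heq2
        subst he
        rw [hsorted, List.flatMap_cons, ih hndr]
        rfl

-- B's pending list IS A's cnt list (before A sorts it)
theorem pvPendEq (row : List Int) :
    ((PySem.List.dedup row).filter (fun v => decide (v ≠ 0))).map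
        (fun v => (v, (PySem.List.count row v : Int)))
      = ((PySem.Dict.counter row).items).filter (fun p => decide (p.1 ≠ 0)) := by
  rw [PySem.Dict.items_counter, List.filter_map]
  simp only [PySem.List.dedup_eq_ofList, PySem.List.count]
  rfl

theorem pvPendNodup (row : List Int) :
    (((PySem.List.dedup row).filter (fun v => decide (v ≠ 0))).map
        (fun v => (v, (PySem.List.count row v : Int)))).Nodup := by
  refine List.Nodup.map (fun a b h => congrArg Prod.fst h) ?_
  simpa [PySem.List.dedup_eq_ofList] using (PySem.Set.nodup_ofList row).filter _

-- per-row agreement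
theorem pvRowAB (row : List Int) :
    (PySem.List.sorted2 (((PySem.Dict.counter row).items).filter (fun p => decide (p.1 ≠ 0)))
        (fun x => x.2) (fun x => x.1) false).foldl (fun l a => l ++ [a.1, a.2]) []
      = pvRowFlat row := by
  unfold pvRowFlat
  rw [pvSelSorted _ (pvPendNodup row), pvPendEq, pvSorted2_eq_sorted_lex]
  rw [PySem.List.foldl_append_eq_flatMap (g := fun p : Int × Int => [p.1, p.2])]
  simp

theorem pvFold (F : List Int → List Int) (arr : List (List Int)) (acc : List (List Int)) (m : Int) :
    arr.foldl (fun st row => (st.1 ++ [F row], max st.2 ((F row).length : Int))) (acc, m)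
      = (acc ++ arr.map F, arr.foldl (fun a row => max a ((F row).length : Int)) m) := by
  induction arr generalizing acc m with
  | nil => simp
  | cons r t ih => simp [List.foldl_cons, ih]

theorem pvBuildEq (rows : List (List Int)) :
    pvBuild rows = (rows.map pvRowFlat,
      rows.foldr (fun r m => max ((pvRowFlat r).length : Int) m) 0) := by
  induction rows with
  | nil => rfl
  | cons r t ih => simp [pvBuild, ih]

theorem pvMaxAcc (f : List Int → Int) (rows : List (List Int)) :
    ∀ c : Int, 0 ≤ c →
      rows.foldl (fun a r => max a (f r)) c = max c (rows.foldr (fun r m => max (f r) m) 0) := by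
  induction rows with
  | nil =>
    intro c hc
    simp only [List.foldl_nil, List.foldr_nil]
    omega
  | cons r t ih =>
    intro c hc
    rw [List.foldl_cons, List.foldr_cons, ih (max c (f r)) (le_trans hc (le_max_left _ _))]
    rw [max_assoc]

theorem pvMain (arr : List (List Int)) : func arr = func_alt arr := by
  unfold func func_alt
  rw [pvFold (F := fun row =>
    (PySem.List.sorted2 (((PySem.Dict.counter row).items).filter (fun p => decide (p.1 ≠ 0)))
      (fun x => x.2) (fun x => x.1) false).foldl (fun l a => l ++ [a.1, a.2]) [])]
  rw [List.nil_append, pvBuildEq]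
  simp only [pvRowAB]
  rw [pvMaxAcc (fun r => ((pvRowFlat r).length : Int)) arr 0 le_rfl]
  have h0 : (0 : Int) ≤ arr.foldr (fun r m => max ((pvRowFlat r).length : Int) m) 0 := by
    induction arr with
    | nil => simp
    | cons r t ih => exact le_max_of_le_right ih
  rw [max_eq_right h0]

-- ===== VERDICT (by name: the statement is the Claim_ definition above) =====
theorem func_spec : Claim_equal_func := by
  intro arr _
  unfold Spec_func
  exact pvMain arr
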